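-- pv_equiv track=rewrite | github.com/GuardCat/GCLibraries | python/Stepik1/magick_matrixes.py | detect_magic
-- ===== SOURCE A (Python) =====
-- def detect_magic(matrix):
--     SUM = sum(matrix[0])
--     NUMS = [int(i) for i in list("123456789")]
--     FLAT = [el for row in matrix for el in row]
--     n = len(matrix)
--
--     for i in NUMS:
--         if not FLAT.count(i):
--             return False
--
--     for row in matrix:
--         if sum(row) != SUM:
--             return False
--     for column in range(n):
--         if sum([matrix[row][column] for row in range(n)]) != SUM:
--                     return False
--
--     if sum([matrix[row][row] for row in range(n)]) != SUM:
--         return False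
--
--     if sum([matrix[row][n - row - 1] for row in range(n)]) != SUM:
--         return False
--
--
--
--     return True
-- ===== SOURCE B (Python) =====
-- def detect_magic(matrix):
--     SUM = sum(matrix[0])
--     n = len(matrix)
--     seen = {v for row in matrix for v in row}
--     if any(d not in seen for d in range(1, 10)):
--         return False
--     if any(sum(row) != SUM for row in matrix):
--         return False
--     diag = anti = 0
--     cols = [0] * n
--     for i, row in enumerate(matrix):
--         diag += row[i]
--         anti += row[n - 1 - i]
--         cols = [c + v for c, v in zip(cols, row)]
--     return diag == SUM and anti == SUM and all(c == SUM for c in cols)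
-- ===== Notes on version B (the rewrite author's own statement) =====
-- stated objective: alternative
-- what changed: B replaces A's nine full count() scans over the flattened list and per-column index comprehensions with a value set built once and a single enumerate loop accumulating both diagonals and a zip-folded column-sum vector.
-- outside the precondition, e.g. on detect_magic([[1, 2, 5, 7], [3, 4, 8, 0], [9, 6]]): A returns False, B raises IndexError
import Mathlib
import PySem

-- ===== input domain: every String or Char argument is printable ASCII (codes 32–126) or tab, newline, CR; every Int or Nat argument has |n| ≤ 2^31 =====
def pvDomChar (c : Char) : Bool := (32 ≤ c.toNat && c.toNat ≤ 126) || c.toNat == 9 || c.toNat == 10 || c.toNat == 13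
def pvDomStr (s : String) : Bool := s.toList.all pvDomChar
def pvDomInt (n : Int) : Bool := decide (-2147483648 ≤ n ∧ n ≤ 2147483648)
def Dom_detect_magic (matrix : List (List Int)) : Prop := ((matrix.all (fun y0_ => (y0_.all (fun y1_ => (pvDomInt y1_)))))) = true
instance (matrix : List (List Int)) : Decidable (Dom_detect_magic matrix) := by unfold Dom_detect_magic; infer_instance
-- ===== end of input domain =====

-- B trades A's per-digit count() scans and separate column/diagonal comprehensions for a
-- value set built once plus a single enumerate loop accumulating the diagonals and a
-- zip-folded column-sum vector (objective: alternative, same asymptotic cost).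

-- ===== PORT A =====
def detect_magic (matrix : List (List Int)) : Bool :=
  let SUM := (PySem.List.pyGetD matrix 0 []).sum  -- matrix[0]: IndexError on [] is excluded by Pre_
  let NUMS : List Int := [1, 2, 3, 4, 5, 6, 7, 8, 9]
  let FLAT := matrix.flatMap (fun row => row)
  let n : Int := matrix.length
  if NUMS.any (fun i => PySem.List.count FLAT i == 0) then false
  else if matrix.any (fun row => !(row.sum == SUM)) then false
  else if (PySem.List.pyRange 0 n 1).any (fun column =>
      !(((PySem.List.pyRange 0 n 1).map (fun row =>
          PySem.List.pyGetD (PySem.List.pyGetD matrix row []) column 0)).sum == SUM)) then false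
  -- IndexError inside the three index comprehensions is excluded by Pre_
  else if !(((PySem.List.pyRange 0 n 1).map (fun row =>
      PySem.List.pyGetD (PySem.List.pyGetD matrix row []) row 0)).sum == SUM) then false
  else if !(((PySem.List.pyRange 0 n 1).map (fun row =>
      PySem.List.pyGetD (PySem.List.pyGetD matrix row []) (n - row - 1) 0)).sum == SUM) then false
  else true

-- ===== PORT B =====
def detect_magic_alt (matrix : List (List Int)) : Bool :=
  let SUM := (PySem.List.pyGetD matrix 0 []).sum  -- matrix[0]: IndexError on [] is excluded by Pre_
  let n : Int := matrix.length
  let seen : PySem.Set Int := PySem.Set.ofList (matrix.flatMap (fun row => row))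
  if (PySem.List.pyRange 1 10 1).any (fun d => !(PySem.Set.contains seen d)) then false
  else if matrix.any (fun row => !(row.sum == SUM)) then false
  else
    let st := (PySem.List.enumerate matrix 0).foldl
      (fun (st : Int × Int × List Int) p =>
        (st.1 + PySem.List.pyGetD p.2 p.1 0,          -- diag += row[i]  (IndexError excluded by Pre_)
         st.2.1 + PySem.List.pyGetD p.2 (n - 1 - p.1) 0,  -- anti += row[n-1-i]
         (st.2.2.zip p.2).map (fun cv => cv.1 + cv.2)))   -- cols = [c+v for c,v in zip(cols,row)]
      (0, 0, List.replicate matrix.length 0)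
    (st.1 == SUM) && (st.2.1 == SUM) && st.2.2.all (fun c => c == SUM)

-- ===== PRECONDITION & SPEC =====
-- Pre_ excludes the empty matrix (A raises IndexError on matrix[0]) and ragged matrices on
-- which every digit 1..9 occurs and every row sum matches: there A's index comprehensions
-- raise IndexError, or return False only by the accident of which column is scanned first
-- (B's diagonal loop raises on those inputs).
def Pre_detect_magic (matrix : List (List Int)) : Prop :=
  matrix ≠ [] ∧
    ((∀ row ∈ matrix, matrix.length ≤ row.length) ∨
     (∃ d ∈ ([1, 2, 3, 4, 5, 6, 7, 8, 9] : List Int), d ∉ matrix.flatMap (fun row => row)) ∨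
     (∃ row ∈ matrix, row.sum ≠ matrix.headI.sum))
instance (matrix : List (List Int)) : Decidable (Pre_detect_magic matrix) := by
  unfold Pre_detect_magic; infer_instance
def pvWitness_detect_magic : List (List Int) := [[2, 7, 6], [9, 5, 1], [4, 3, 8]]
def Spec_detect_magic (matrix : List (List Int)) (out : Bool) : Prop := out = detect_magic_alt matrix
instance (matrix : List (List Int)) (out : Bool) : Decidable (Spec_detect_magic matrix out) := by unfold Spec_detect_magic; infer_instance

-- ===== CLAIM (what is proved, stated in full; the proofs are below) =====
def Claim_equal_detect_magic : Prop := ∀ (matrix : List (List Int)), Dom_detect_magic matrix → Pre_detect_magic matrix → Spec_detect_magic matrix (detect_magic matrix)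

-- ===== LEMMAS AND PROOFS =====

-- the digit checks agree: count = 0 on the flat list iff the value is missing from the set
lemma digit_checks_eq (matrix : List (List Int)) :
    (([1, 2, 3, 4, 5, 6, 7, 8, 9] : List Int).any
        (fun i => PySem.List.count (matrix.flatMap (fun row => row)) i == 0))
      = ((PySem.List.pyRange 1 10 1).any
        (fun d => !(PySem.Set.contains (PySem.Set.ofList (matrix.flatMap (fun row => row))) d))) := by
  have h : PySem.List.pyRange 1 10 1 = ([1, 2, 3, 4, 5, 6, 7, 8, 9] : List Int) := by decide
  rw [h]
  congr 1
  funext d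
  rw [Bool.eq_iff_iff]
  simp [PySem.List.count_eq, PySem.Set.contains, PySem.Set.mem_ofList,
    List.count_eq_zero, List.mem_flatten]

-- a map over range(len(xs)) of f(xs[r]) is a map over xs
lemma map_rows (xs : List (List Int)) (g : List Int → Int) :
    (PySem.List.pyRange 0 (xs.length : Int) 1).map
        (fun r => g (PySem.List.pyGetD xs r [])) = xs.map g := by
  have h := PySem.List.map_pyGetD_pyRange_zero' xs ([] : List Int)
  calc (PySem.List.pyRange 0 (xs.length : Int) 1).map (fun r => g (PySem.List.pyGetD xs r []))
      = ((PySem.List.pyRange 0 (xs.length : Int) 1).map (fun r => PySem.List.pyGetD xs r [])).map g := by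
        rw [List.map_map]; rfl
    _ = xs.map g := by rw [h]

-- the triple fold splits into three independent folds
lemma foldl_prod3 {α : Type} (f1 : Int → α → Int) (f2 : Int → α → Int)
    (f3 : List Int → α → List Int) (l : List α) (a b : Int) (c : List Int) :
    l.foldl (fun (st : Int × Int × List Int) p =>
        (f1 st.1 p, f2 st.2.1 p, f3 st.2.2 p)) (a, b, c)
      = (l.foldl f1 a, l.foldl f2 b, l.foldl f3 c) := by
  induction l generalizing a b c with
  | nil => rfl
  | cons x xs ih => simp [List.foldl_cons, ih]

-- the zip-fold column accumulator: elementwise characterisation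
lemma cols_foldl (rows : List (List Int)) (cols : List Int)
    (h : ∀ row ∈ rows, cols.length ≤ row.length) :
    rows.foldl (fun cols row => (cols.zip row).map (fun cv => cv.1 + cv.2)) cols
      = (List.range cols.length).map
          (fun j => cols.getD j 0 + (rows.map (fun row => row.getD j 0)).sum) := by
  induction rows generalizing cols with
  | nil =>
    simp only [List.foldl_nil, List.map_nil, List.sum_nil, add_zero]
    apply List.ext_getElem
    · simp
    · intro i h1 h2
      simp [List.getD_eq_getElem?_getD, h1]
  | cons row rows ih =>
    have hrow : cols.length ≤ row.length := h row (by simp)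
    have hlen : ((cols.zip row).map (fun cv => cv.1 + cv.2)).length = cols.length := by
      simp [Nat.min_eq_left hrow]
    rw [List.foldl_cons, ih _ (by intro r hr; rw [hlen]; exact h r (by simp [hr]))]
    rw [hlen]
    apply List.map_congr_left
    intro j hj
    simp only [List.mem_range] at hj
    have h1 : ((cols.zip row).map (fun cv => cv.1 + cv.2)).getD j 0
        = cols.getD j 0 + row.getD j 0 := by
      have hj2 : j < row.length := lt_of_lt_of_le hj hrow
      simp [List.getD_eq_getElem?_getD, hj, hj2, Nat.min_eq_left hrow, List.getElem_zip]
    rw [h1]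
    simp [add_assoc]


-- ===== VERDICT (by name: the statement is the Claim_ definition above) =====
theorem detect_magic_spec : Claim_equal_detect_magic := by
  intro matrix _ hpre
  unfold Spec_detect_magic
  simp only [detect_magic, detect_magic_alt]
  rw [← digit_checks_eq]
  cases hdig : (([1, 2, 3, 4, 5, 6, 7, 8, 9] : List Int).any
      (fun i => PySem.List.count (matrix.flatMap (fun row => row)) i == 0)) with
  | true => simp
  | false =>
    simp only [Bool.false_eq_true, if_false]
    cases hrow : matrix.any (fun row => !(row.sum == (PySem.List.pyGetD matrix 0 []).sum)) with
    | true => simp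
    | false =>
      simp only [Bool.false_eq_true, if_false]
      -- extract the length disjunct of Pre_
      have hlen : ∀ row ∈ matrix, matrix.length ≤ row.length := by
        rcases hpre with ⟨hne, h | h | h⟩
        · exact h
        · exfalso
          obtain ⟨d, hd, hnot⟩ := h
          have := List.any_eq_false.mp hdig d hd
          simp only [beq_iff_eq] at this
          rw [PySem.List.count_eq] at this
          exact this (List.count_eq_zero.mpr hnot)
        · exfalso
          obtain ⟨row, hr, hsum⟩ := h
          have := List.any_eq_false.mp hrow row hr
          cases matrix with
          | nil => exact hne rfl
          | cons r0 rest =>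
            simp only [PySem.List.pyGetD_zero_cons, List.headI] at this hsum
            simp only [Bool.not_eq_eq_eq_not, Bool.not_true, beq_eq_false_iff_ne, ne_eq,
              Decidable.not_not] at this
            exact hsum this
      -- split the triple fold
      have hsplit := foldl_prod3
            (fun (a : Int) (p : Int × List Int) => a + PySem.List.pyGetD p.2 p.1 0)
            (fun (a : Int) (p : Int × List Int) =>
              a + PySem.List.pyGetD p.2 ((matrix.length : Int) - 1 - p.1) 0)
            (fun (c : List Int) (p : Int × List Int) => (c.zip p.2).map (fun cv => cv.1 + cv.2))
            (PySem.List.enumerate matrix 0) 0 0 (List.replicate matrix.length 0)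
      rw [hsplit]
      -- diagonal
      have hdiag : (PySem.List.enumerate matrix 0).foldl
            (fun (a : Int) (p : Int × List Int) => a + PySem.List.pyGetD p.2 p.1 0) 0
          = ((PySem.List.pyRange 0 (matrix.length : Int) 1).map
              (fun r => PySem.List.pyGetD (PySem.List.pyGetD matrix r []) r 0)).sum := by
        rw [PySem.List.enumerate_eq_map_pyRange matrix ([] : List Int)]
        simp only [List.foldl_map, PySem.List.foldl_add, zero_add, PySem.List.len_eq]
      -- anti-diagonal
      have hanti : (PySem.List.enumerate matrix 0).foldl
            (fun (a : Int) (p : Int × List Int) =>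
              a + PySem.List.pyGetD p.2 ((matrix.length : Int) - 1 - p.1) 0) 0
          = ((PySem.List.pyRange 0 (matrix.length : Int) 1).map
              (fun r => PySem.List.pyGetD (PySem.List.pyGetD matrix r []) ((matrix.length : Int) - r - 1) 0)).sum := by
        rw [PySem.List.enumerate_eq_map_pyRange matrix ([] : List Int)]
        simp only [List.foldl_map, PySem.List.foldl_add, zero_add, PySem.List.len_eq]
        congr 1
        apply List.map_congr_left
        intro j _
        congr 1
        ring
      -- columns
      have hcols : (PySem.List.enumerate matrix 0).foldl
            (fun (c : List Int) (p : Int × List Int) => (c.zip p.2).map (fun cv => cv.1 + cv.2))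
            (List.replicate matrix.length 0)
          = (List.range matrix.length).map
              (fun (j : Nat) => ((PySem.List.pyRange 0 (matrix.length : Int) 1).map
                (fun r => PySem.List.pyGetD (PySem.List.pyGetD matrix r []) ((j : Nat) : Int) 0)).sum) := by
        rw [PySem.List.enumerate_eq_map_pyRange matrix ([] : List Int)]
        simp only [List.foldl_map, PySem.List.len_eq]
        have hstep := PySem.List.foldl_pyRange_zero_pyGetD' matrix ([] : List Int)
          (fun c row => (c.zip row).map (fun cv => cv.1 + cv.2)) (List.replicate matrix.length 0)
        rw [hstep, cols_foldl matrix (List.replicate matrix.length 0) (by simpa using hlen)]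
        simp only [List.length_replicate]
        apply List.map_congr_left
        intro j hj
        rw [map_rows matrix (fun row => PySem.List.pyGetD row (j : Int) 0)]
        simp [List.getD_eq_getElem?_getD, List.getElem?_replicate]
        split <;> rfl
      rw [hdiag, hanti, hcols]
      -- reduce A's column loop and B's final all to the same range scan
      rw [PySem.List.pyRange_zero (matrix.length : Int)]
      simp only [Int.toNat_natCast, List.any_map, List.all_map, Function.comp_def]
      rw [List.all_eq_not_any_not]
      generalize (List.range matrix.length).any _ = a
      cases a <;> simp
      rfl
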